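-- pv_equiv track=rewrite | github.com/maximilian-salomon/mdxplain | mdxplain/feature_selection/managers/feature_selector_manager.py | _remove_duplicate_indices
-- ===== SOURCE A (Python) =====
-- def _remove_duplicate_indices(
--     all_column_indices: list, use_reduced_indices: list
-- ) -> tuple:
--     """
--     Remove duplicate indices while preserving use_reduced information.
--
--     Parameters:
--     -----------
--     all_column_indices : list
--         List of all column indices
--     use_reduced_indices : list
--         List of indices that use reduced data
--
--     Returns:
--     --------
--     tuple
--         Tuple of (unique_indices, unique_use_reduced)
--     """
--     unique_indices = []
--     unique_use_reduced = []
--     seen = set()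
--
--     for idx, col_idx in enumerate(all_column_indices):
--         if col_idx not in seen:
--             seen.add(col_idx)
--             unique_indices.append(col_idx)
--             unique_use_reduced.append(use_reduced_indices[idx])
--
--     # Sort by indices for consistent, interpretable order
--     sorted_pairs = sorted(zip(unique_indices, unique_use_reduced))
--     sorted_indices = [idx for idx, _ in sorted_pairs]
--     sorted_use_reduced = [reduced for _, reduced in sorted_pairs]
--
--     return sorted_indices, sorted_use_reduced
-- ===== SOURCE B (Python) =====
-- def _remove_duplicate_indices(
--     all_column_indices: list, use_reduced_indices: list
-- ) -> tuple:
--     """Sort-then-dedup: stably sort all (index, flag) pairs by index, then keep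
--     the first pair of each equal-index run (which is the first occurrence)."""
--     pairs = [
--         (col_idx, use_reduced_indices[idx])
--         for idx, col_idx in enumerate(all_column_indices)
--     ]
--     pairs.sort(key=lambda p: p[0])
--
--     sorted_indices = []
--     sorted_use_reduced = []
--     prev = None
--     for col_idx, reduced in pairs:
--         if prev is None or col_idx != prev:
--             sorted_indices.append(col_idx)
--             sorted_use_reduced.append(reduced)
--             prev = col_idx
--
--     return sorted_indices, sorted_use_reduced
-- ===== Notes on version B (the rewrite author's own statement) =====
-- stated objective: alternative
-- what changed: A deduplicates first (a seen-set plus two parallel lists, reading a flag only at each first occurrence) and then sorts the unique pairs; B builds every (index, flag) pair up front, stably sorts them by index alone, and keeps the first pair of each equal-index run in one linear pass (sort-then-dedup instead of dedup-then-sort).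
-- outside the precondition, e.g. on _remove_duplicate_indices([0, 0], [True]): A returns ([0], [True]), B raises IndexError
import Mathlib
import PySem

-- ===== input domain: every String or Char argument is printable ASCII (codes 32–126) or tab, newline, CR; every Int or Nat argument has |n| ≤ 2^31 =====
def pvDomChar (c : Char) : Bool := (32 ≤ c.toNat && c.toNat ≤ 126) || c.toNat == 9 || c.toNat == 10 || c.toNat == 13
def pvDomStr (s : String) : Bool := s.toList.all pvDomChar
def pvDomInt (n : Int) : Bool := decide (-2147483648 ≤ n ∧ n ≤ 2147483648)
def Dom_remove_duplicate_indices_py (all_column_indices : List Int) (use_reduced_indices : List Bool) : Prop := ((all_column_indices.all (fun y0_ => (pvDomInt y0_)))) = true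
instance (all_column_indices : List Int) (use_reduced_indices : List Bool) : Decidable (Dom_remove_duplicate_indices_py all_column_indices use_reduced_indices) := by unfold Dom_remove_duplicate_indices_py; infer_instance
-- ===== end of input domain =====

-- B replaces A's dedup-then-sort (seen-set + two parallel lists, then sorting the unique
-- pairs) by sort-then-dedup: build all (index, flag) pairs, stably sort by index alone,
-- keep the first pair of each equal-index run (objective: alternative algorithm, same cost).


-- ===== PORT A =====
-- loop over enumerate(all_column_indices): if unseen, record col_idx and its flag;
-- then sorted(zip(...)) (Python tuple order) and two unzipping comprehensions.
-- use_reduced_indices[idx] is PySem.List.pyGetD … false: inside Pre_ the index is in range.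
def remove_duplicate_indices_py (all_column_indices : List Int) (use_reduced_indices : List Bool) : List Int × List Bool :=
  let st := (PySem.List.enumerate all_column_indices 0).foldl
    (fun (s : PySem.Set Int × List Int × List Bool) p =>
      if PySem.Set.contains s.1 p.2 then s
      else (PySem.Set.add s.1 p.2, s.2.1 ++ [p.2],
            s.2.2 ++ [PySem.List.pyGetD use_reduced_indices p.1 false]))
    (PySem.Set.empty, [], [])
  let sorted_pairs := PySem.List.sorted2 (st.2.1.zip st.2.2) Prod.fst Prod.snd
  (sorted_pairs.map Prod.fst, sorted_pairs.map Prod.snd)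

-- ===== PORT B =====
-- build all (col_idx, flag) pairs, stable-sort by the index alone, then one linear pass
-- emitting the first pair of each equal-index run (prev is the Option Int component).
-- use_reduced_indices[idx] is PySem.List.pyGetD … true: inside Pre_ the index is in range.
def remove_duplicate_indices_py_alt (all_column_indices : List Int) (use_reduced_indices : List Bool) : List Int × List Bool :=
  let pairs := (PySem.List.enumerate all_column_indices 0).map
    (fun p => (p.2, PySem.List.pyGetD use_reduced_indices p.1 true))
  let sp := PySem.List.sorted pairs Prod.fst
  let st := sp.foldl
    (fun (s : List Int × List Bool × Option Int) p =>
      if s.2.2 = none ∨ some p.1 ≠ s.2.2 then (s.1 ++ [p.1], s.2.1 ++ [p.2], some p.1) else s)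
    ([], [], none)
  (st.1, st.2.1)

-- ===== PRECONDITION & SPEC =====
-- Pre_ excludes inputs where use_reduced_indices is shorter than all_column_indices:
-- there A raises IndexError unless every out-of-range position happens to hold a duplicate
-- (an accidental return), and B, reading every position once, raises on any shortfall.
def Pre_remove_duplicate_indices_py (all_column_indices : List Int) (use_reduced_indices : List Bool) : Prop :=
  all_column_indices.length ≤ use_reduced_indices.length
instance (all_column_indices : List Int) (use_reduced_indices : List Bool) : Decidable (Pre_remove_duplicate_indices_py all_column_indices use_reduced_indices) := by unfold Pre_remove_duplicate_indices_py; infer_instance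

def pvWitness_remove_duplicate_indices_py : List Int × List Bool := ([3, 1, 3, 1], [true, false, false, true])

def Spec_remove_duplicate_indices_py (all_column_indices : List Int) (use_reduced_indices : List Bool) (out : List Int × List Bool) : Prop := out = remove_duplicate_indices_py_alt all_column_indices use_reduced_indices
instance (all_column_indices : List Int) (use_reduced_indices : List Bool) (out : List Int × List Bool) : Decidable (Spec_remove_duplicate_indices_py all_column_indices use_reduced_indices out) := by unfold Spec_remove_duplicate_indices_py; infer_instance

-- ===== CLAIM (what is proved, stated in full; the proofs are below) =====
def Claim_equal_remove_duplicate_indices_py : Prop := ∀ (all_column_indices : List Int) (use_reduced_indices : List Bool), Dom_remove_duplicate_indices_py all_column_indices use_reduced_indices → Pre_remove_duplicate_indices_py all_column_indices use_reduced_indices → Spec_remove_duplicate_indices_py all_column_indices use_reduced_indices (remove_duplicate_indices_py all_column_indices use_reduced_indices)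

-- ===== LEMMAS AND PROOFS =====

-- key-dedup with initial accumulator: the pair list A's dedup loop builds
def pvKd (l : List (Int × Bool)) (d : List (Int × Bool)) : List (Int × Bool) :=
  match l with
  | [] => d
  | p :: t => if p.1 ∈ d.map Prod.fst then pvKd t d else pvKd t (d ++ [p])

def pvRfirst (l : List (Int × Bool)) (prev : Option Int) : List (Int × Bool) :=
  match l with
  | [] => []
  | p :: t => if prev = none ∨ some p.1 ≠ prev then p :: pvRfirst t (some p.1) else pvRfirst t prev

def pvLastK (l : List (Int × Bool)) (prev : Option Int) : Option Int :=
  match l with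
  | [] => prev
  | p :: t => if prev = none ∨ some p.1 ≠ prev then pvLastK t (some p.1) else pvLastK t prev

theorem pvA_fold (l : List (Int × Bool)) (d : List (Int × Bool)) :
    l.foldl (fun (s : PySem.Set Int × List Int × List Bool) q =>
        if PySem.Set.contains s.1 q.1 then s
        else (PySem.Set.add s.1 q.1, s.2.1 ++ [q.1], s.2.2 ++ [q.2]))
      (d.map Prod.fst, d.map Prod.fst, d.map Prod.snd)
    = ((pvKd l d).map Prod.fst, (pvKd l d).map Prod.fst, (pvKd l d).map Prod.snd) := by
  induction l generalizing d with
  | nil => simp [pvKd]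
  | cons p t ih =>
    rw [List.foldl_cons]
    by_cases h : p.1 ∈ d.map Prod.fst
    · have hc : PySem.Set.contains (d.map Prod.fst) p.1 = true := by
        simp [PySem.Set.contains, h]
      rw [show pvKd (p :: t) d = pvKd t d by rw [pvKd, if_pos h]]
      rw [if_pos hc]
      exact ih d
    · have hc : ¬ (PySem.Set.contains (d.map Prod.fst) p.1 = true) := by
        simp [PySem.Set.contains, h]
      rw [show pvKd (p :: t) d = pvKd t (d ++ [p]) by rw [pvKd, if_neg h]]
      rw [if_neg hc, PySem.Set.add_of_not_mem h]
      have := ih (d ++ [p])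
      simp only [List.map_append, List.map_cons, List.map_nil] at this
      exact this

theorem pvB_fold (l : List (Int × Bool)) (prev : Option Int) (a : List Int) (b : List Bool) :
    l.foldl (fun (s : List Int × List Bool × Option Int) p =>
        if s.2.2 = none ∨ some p.1 ≠ s.2.2 then (s.1 ++ [p.1], s.2.1 ++ [p.2], some p.1) else s)
      (a, b, prev)
    = (a ++ (pvRfirst l prev).map Prod.fst, b ++ (pvRfirst l prev).map Prod.snd, pvLastK l prev) := by
  induction l generalizing prev a b with
  | nil => simp [pvRfirst, pvLastK]
  | cons p t ih =>
    rw [List.foldl_cons]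
    by_cases h : prev = none ∨ some p.1 ≠ prev
    · rw [show pvRfirst (p :: t) prev = p :: pvRfirst t (some p.1) by rw [pvRfirst, if_pos h]]
      rw [show pvLastK (p :: t) prev = pvLastK t (some p.1) by rw [pvLastK, if_pos h]]
      rw [if_pos h, ih]
      simp
    · rw [show pvRfirst (p :: t) prev = pvRfirst t prev by rw [pvRfirst, if_neg h]]
      rw [show pvLastK (p :: t) prev = pvLastK t prev by rw [pvLastK, if_neg h]]
      rw [if_neg h, ih]

theorem pvKd_fst_nodup (l : List (Int × Bool)) (d : List (Int × Bool))
    (h : (d.map Prod.fst).Nodup) : ((pvKd l d).map Prod.fst).Nodup := by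
  induction l generalizing d with
  | nil => simpa [pvKd]
  | cons p t ih =>
    by_cases hm : p.1 ∈ d.map Prod.fst
    · rw [show pvKd (p :: t) d = pvKd t d by rw [pvKd, if_pos hm]]
      exact ih d h
    · rw [show pvKd (p :: t) d = pvKd t (d ++ [p]) by rw [pvKd, if_neg hm]]
      refine ih (d ++ [p]) ?_
      rw [List.map_append, List.map_cons, List.map_nil]
      rw [List.nodup_append]
      refine ⟨h, List.nodup_singleton _, ?_⟩
      intro x hx y hy
      rw [List.mem_singleton] at hy
      subst hy
      exact fun hxy => hm (hxy ▸ hx)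

theorem pvMem_kd (l : List (Int × Bool)) (d : List (Int × Bool)) (x : Int × Bool) :
    x ∈ pvKd l d ↔ x ∈ d ∨ (x.1 ∉ d.map Prod.fst ∧ l.find? (fun q => q.1 == x.1) = some x) := by
  induction l generalizing d with
  | nil => simp [pvKd]
  | cons p t ih =>
    by_cases hm : p.1 ∈ d.map Prod.fst
    · rw [show pvKd (p :: t) d = pvKd t d by rw [pvKd, if_pos hm]]
      rw [ih]
      by_cases he : p.1 = x.1
      · rw [List.find?_cons_of_pos (by simpa using he)]
        have hx : x.1 ∈ d.map Prod.fst := he ▸ hm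
        constructor
        · rintro (h | ⟨h1, h2⟩)
          · exact Or.inl h
          · exact absurd hx h1
        · rintro (h | ⟨h1, h2⟩)
          · exact Or.inl h
          · exact absurd hx h1
      · rw [List.find?_cons_of_neg (by simpa using he)]
    · rw [show pvKd (p :: t) d = pvKd t (d ++ [p]) by rw [pvKd, if_neg hm]]
      rw [ih]
      have hmap : (d ++ [p]).map Prod.fst = d.map Prod.fst ++ [p.1] := by simp
      by_cases he : p.1 = x.1
      · rw [List.find?_cons_of_pos (by simpa using he)]
        constructor
        · rintro (h | ⟨h1, h2⟩)
          · rw [List.mem_append, List.mem_singleton] at h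
            rcases h with h | h
            · exact Or.inl h
            · exact Or.inr ⟨he ▸ hm, by rw [h]⟩
          · exact absurd (by rw [hmap]; simp [he.symm]) h1
        · rintro (h | ⟨h1, h2⟩)
          · exact Or.inl (by simp [h])
          · have : x = p := by injection h2 with h2; exact h2.symm
            exact Or.inl (by simp [this])
      · rw [List.find?_cons_of_neg (by simpa using he)]
        constructor
        · rintro (h | ⟨h1, h2⟩)
          · rw [List.mem_append, List.mem_singleton] at h
            rcases h with h | h
            · exact Or.inl h
            · exact absurd (congrArg Prod.fst h).symm he
          · refine Or.inr ⟨?_, h2⟩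
            rw [hmap] at h1
            intro hx
            exact h1 (List.mem_append.2 (Or.inl hx))
        · rintro (h | ⟨h1, h2⟩)
          · exact Or.inl (by simp [h])
          · refine Or.inr ⟨?_, h2⟩
            rw [hmap, List.mem_append, List.mem_singleton]
            rintro (hx | hx)
            · exact h1 hx
            · exact he hx.symm

theorem pvInsertBy_congr {α : Type} (f g : α → α → Bool) (x : α) (ys : List α)
    (h : ∀ y ∈ ys, f x y = g x y) :
    PySem.List.insertBy f x ys = PySem.List.insertBy g x ys := by
  induction ys with
  | nil => rfl
  | cons y t ih =>
    rw [PySem.List.insertBy, PySem.List.insertBy]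
    rw [h y (by simp)]
    by_cases hg : g x y = true
    · rw [if_pos hg, if_pos hg]
    · rw [if_neg hg, if_neg hg, ih (fun z hz => h z (by simp [hz]))]

theorem pvFoldl_insertBy_congr {α : Type} (f g : α → α → Bool) (l : List α) :
    ∀ (acc : List α), (∀ a ∈ l, ∀ b ∈ acc, f a b = g a b) → (∀ a ∈ l, ∀ b ∈ l, f a b = g a b) →
    l.foldl (fun acc x => PySem.List.insertBy f x acc) acc
      = l.foldl (fun acc x => PySem.List.insertBy g x acc) acc := by
  induction l with
  | nil => intro acc _ _; rfl
  | cons p t ih =>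
    intro acc hacc hl
    rw [List.foldl_cons, List.foldl_cons]
    rw [pvInsertBy_congr f g p acc (fun y hy => hacc p (by simp) y hy)]
    refine ih (PySem.List.insertBy g p acc) ?_ ?_
    · intro a ha b hb
      rw [PySem.List.mem_insertBy] at hb
      rcases hb with rfl | hb
      · exact hl a (by simp [ha]) b (by simp)
      · exact hacc a (by simp [ha]) b hb
    · intro a ha b hb
      exact hl a (by simp [ha]) b (by simp [hb])

theorem pvSorted2_eq_sorted (L : List (Int × Bool)) (h : (L.map Prod.fst).Nodup) :
    PySem.List.sorted2 L Prod.fst Prod.snd = PySem.List.sorted L Prod.fst := by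
  rw [PySem.List.sorted_eq_foldl_insertBy]
  show L.foldl (fun acc x => PySem.List.insertBy
      (fun a b => decide (a.1 < b.1) || (!decide (b.1 < a.1) && decide (a.2 < b.2))) x acc) []
    = L.foldl (fun acc x => PySem.List.insertBy (fun a b => decide (a.1 < b.1)) x acc) []
  refine pvFoldl_insertBy_congr _ _ L [] (by intro a _ b hb; simp at hb) ?_
  intro a ha b hb
  rcases lt_trichotomy a.1 b.1 with hlt | heq | hgt
  · simp [hlt, not_lt.2 (le_of_lt hlt)]
  · have hab : a = b := List.inj_on_of_nodup_map h ha hb heq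
    subst hab
    simp
  · simp [hgt, not_lt.2 (le_of_lt hgt)]

theorem pvRfirst_pairwise (l : List (Int × Bool)) (prev : Option Int)
    (hl : l.Pairwise (fun a b => a.1 ≤ b.1))
    (hp : ∀ p ∈ l, ∀ v, prev = some v → v ≤ p.1) :
    (pvRfirst l prev).Pairwise (fun a b => a.1 < b.1)
      ∧ ∀ q ∈ pvRfirst l prev, ∀ v, prev = some v → v < q.1 := by
  induction l generalizing prev with
  | nil => simp [pvRfirst]
  | cons p t ih =>
    rw [List.pairwise_cons] at hl
    obtain ⟨hpt, hlt⟩ := hl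
    by_cases h : prev = none ∨ some p.1 ≠ prev
    · rw [show pvRfirst (p :: t) prev = p :: pvRfirst t (some p.1) by rw [pvRfirst, if_pos h]]
      have hip : ∀ q ∈ t, ∀ v, (some p.1 : Option Int) = some v → v ≤ q.1 := by
        intro q hq v hv
        injection hv with hv
        exact hv ▸ hpt q hq
      obtain ⟨hR1, hR2⟩ := ih (some p.1) hlt hip
      constructor
      · exact List.pairwise_cons.2 ⟨fun q hq => hR2 q hq p.1 rfl, hR1⟩
      · intro q hq v hv
        have hvp : v < p.1 := by
          rcases h with h | h
          · rw [h] at hv; exact absurd hv (by simp)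
          · have := hp p (by simp) v hv
            rcases lt_or_eq_of_le this with h2 | h2
            · exact h2
            · exact absurd (hv ▸ congrArg some h2.symm ▸ rfl : (some p.1 : Option Int) = prev) h
        rcases List.mem_cons.1 hq with rfl | hq
        · exact hvp
        · exact lt_trans hvp (hR2 q hq p.1 rfl)
    · push_neg at h
      obtain ⟨h1, h2⟩ := h
      rw [show pvRfirst (p :: t) prev = pvRfirst t prev by rw [pvRfirst, if_neg (by push_neg; exact ⟨h1, h2⟩)]]
      refine ih prev hlt ?_
      intro q hq v hv
      rw [← h2] at hv
      injection hv with hv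
      exact hv ▸ hpt q hq

theorem pvMem_rfirst (l : List (Int × Bool)) (prev : Option Int) (x : Int × Bool)
    (hl : l.Pairwise (fun a b => a.1 ≤ b.1))
    (hp : ∀ p ∈ l, ∀ v, prev = some v → v ≤ p.1) :
    x ∈ pvRfirst l prev ↔ (∀ v, prev = some v → v ≠ x.1) ∧ l.find? (fun q => q.1 == x.1) = some x := by
  induction l generalizing prev with
  | nil => simp [pvRfirst]
  | cons p t ih =>
    rw [List.pairwise_cons] at hl
    obtain ⟨hpt, hlt⟩ := hl
    by_cases h : prev = none ∨ some p.1 ≠ prev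
    · rw [show pvRfirst (p :: t) prev = p :: pvRfirst t (some p.1) by rw [pvRfirst, if_pos h]]
      have hip : ∀ q ∈ t, ∀ v, (some p.1 : Option Int) = some v → v ≤ q.1 := by
        intro q hq v hv; injection hv with hv; exact hv ▸ hpt q hq
      have hIH := ih (some p.1) hlt hip
      by_cases he : p.1 = x.1
      · rw [List.find?_cons_of_pos (by simpa using he)]
        have hnotR : x ∉ pvRfirst t (some p.1) := by
          rw [hIH]
          rintro ⟨h1, -⟩
          exact h1 p.1 rfl he
        constructor
        · intro hx
          rcases List.mem_cons.1 hx with rfl | hx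
          · refine ⟨?_, rfl⟩
            intro v hv hve
            rcases h with h | h
            · rw [h] at hv; exact absurd hv (by simp)
            · exact h (by rw [hv, hve, he])
          · exact absurd hx hnotR
        · rintro ⟨-, h2⟩
          injection h2 with h2
          exact h2 ▸ List.mem_cons_self
      · rw [List.find?_cons_of_neg (by simpa using he)]
        constructor
        · intro hx
          rcases List.mem_cons.1 hx with rfl | hx
          · exact absurd rfl he
          · obtain ⟨-, h2⟩ := hIH.1 hx
            refine ⟨?_, h2⟩
            intro v hv hve
            have hxt : x ∈ t := List.mem_of_find?_eq_some h2
            have h3 : v ≤ p.1 := hp p (by simp) v hv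
            have h4 : p.1 ≤ x.1 := hpt x hxt
            exact he (le_antisymm h4 (hve ▸ h3))
        · rintro ⟨h1, h2⟩
          refine List.mem_cons.2 (Or.inr (hIH.2 ⟨?_, h2⟩))
          intro v hv
          injection hv with hv
          exact hv ▸ he
    · push_neg at h
      obtain ⟨h1, h2⟩ := h
      rw [show pvRfirst (p :: t) prev = pvRfirst t prev by rw [pvRfirst, if_neg (by push_neg; exact ⟨h1, h2⟩)]]
      have hip : ∀ q ∈ t, ∀ v, prev = some v → v ≤ q.1 := by
        intro q hq v hv
        rw [← h2] at hv; injection hv with hv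
        exact hv ▸ hpt q hq
      have hIH := ih prev hlt hip
      by_cases he : p.1 = x.1
      · constructor
        · intro hx
          obtain ⟨hc, -⟩ := hIH.1 hx
          exact absurd (he ▸ h2.symm) (fun hh => hc p.1 hh he)
        · rintro ⟨hc, -⟩
          exact absurd (he ▸ h2.symm) (fun hh => hc p.1 hh he)
      · rw [List.find?_cons_of_neg (by simpa using he)]
        exact hIH

theorem pvFilter_insertBy (x : Int × Bool) (S : List (Int × Bool)) (c : Int)
    (hS : S.Pairwise (fun a b => a.1 ≤ b.1)) :
    (PySem.List.insertBy (fun a b => decide (a.1 < b.1)) x S).filter (fun q => q.1 == c)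
      = if x.1 == c then S.filter (fun q => q.1 == c) ++ [x] else S.filter (fun q => q.1 == c) := by
  induction S with
  | nil =>
    rw [PySem.List.insertBy]
    by_cases hc : x.1 == c
    · simp [hc]
    · simp [hc]
  | cons y ys ih =>
    rw [List.pairwise_cons] at hS
    obtain ⟨hy, hys⟩ := hS
    rw [PySem.List.insertBy]
    by_cases hb : decide (x.1 < y.1) = true
    · rw [if_pos hb]
      rw [decide_eq_true_iff] at hb
      have hnil : (y :: ys).filter (fun q => q.1 == c) = [] ∨ ¬ (x.1 == c) := by
        by_cases hc : x.1 = c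
        · refine Or.inl (List.filter_eq_nil_iff.2 ?_)
          intro z hz
          have : y.1 ≤ z.1 := by
            rcases List.mem_cons.1 hz with rfl | hz
            · exact le_refl _
            · exact hy z hz
          simp only [beq_iff_eq]
          intro hzc
          rw [hzc, ← hc] at this
          exact absurd (lt_of_lt_of_le hb this) (lt_irrefl _)
        · exact Or.inr (by simpa using hc)
      by_cases hc : x.1 == c
      · rcases hnil with hnil | hnil
        · rw [if_pos hc, List.filter_cons, hnil]
          simp [hc]
        · exact absurd hc hnil
      · rw [if_neg (by simpa using hc), List.filter_cons]
        simp [hc]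
    · rw [if_neg hb]
      rw [List.filter_cons, List.filter_cons, ih hys]
      by_cases hyc : y.1 == c
      · simp only [hyc, if_true]
        by_cases hc : x.1 == c
        · simp [hc]
        · simp [hc]
      · simp only [hyc]
        by_cases hc : x.1 == c
        · simp [hc]
        · simp [hc]

theorem pvFilter_sorted (P : List (Int × Bool)) (c : Int) :
    (PySem.List.sorted P Prod.fst).filter (fun q => q.1 == c) = P.filter (fun q => q.1 == c) := by
  induction P using List.reverseRecOn with
  | nil => simp [PySem.List.sorted]
  | append_singleton l x ih =>
    have hstep : PySem.List.sorted (l ++ [x]) Prod.fst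
        = PySem.List.insertBy (fun a b => decide (a.1 < b.1)) x (PySem.List.sorted l Prod.fst) := by
      rw [PySem.List.sorted_eq_foldl_insertBy, PySem.List.sorted_eq_foldl_insertBy,
        List.foldl_append, List.foldl_cons, List.foldl_nil]
    rw [hstep, pvFilter_insertBy x _ c (PySem.List.sorted_pairwise l Prod.fst), List.filter_append]
    by_cases hc : x.1 == c
    · rw [if_pos hc, ih, List.filter_cons, List.filter_nil]
      simp [hc]
    · rw [if_neg hc, ih, List.filter_cons, List.filter_nil]
      simp [hc]

theorem pvMain (P : List (Int × Bool)) :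
    PySem.List.sorted2 (pvKd P []) Prod.fst Prod.snd
      = pvRfirst (PySem.List.sorted P Prod.fst) none := by
  have hnd : ((pvKd P []).map Prod.fst).Nodup := pvKd_fst_nodup P [] (by simp)
  rw [pvSorted2_eq_sorted _ hnd]
  have hpwT : (PySem.List.sorted P Prod.fst).Pairwise (fun a b : Int × Bool => a.1 ≤ b.1) :=
    PySem.List.sorted_pairwise P Prod.fst
  have hvac : ∀ p ∈ PySem.List.sorted P Prod.fst, ∀ v, (none : Option Int) = some v → v ≤ p.1 := by
    intro p _ v hv; exact absurd hv (by simp)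
  have hpwE := (pvRfirst_pairwise _ none hpwT hvac).1
  refine PySem.List.sorted_eq_of_perm_of_pairwise_lt _ _ _ ?_ hpwE
  have hmem : ∀ x, x ∈ pvRfirst (PySem.List.sorted P Prod.fst) none ↔ x ∈ pvKd P [] := by
    intro x
    rw [pvMem_rfirst _ none x hpwT hvac, pvMem_kd P [] x]
    have hfind : (PySem.List.sorted P Prod.fst).find? (fun q => q.1 == x.1)
        = P.find? (fun q => q.1 == x.1) := by
      rw [← List.head?_filter, ← List.head?_filter, pvFilter_sorted]
    rw [hfind]
    simp
  have hEnd : (pvRfirst (PySem.List.sorted P Prod.fst) none).Nodup :=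
    hpwE.imp (fun {a b} hab => by intro he; rw [he] at hab; exact lt_irrefl _ hab)
  exact List.perm_of_nodup_nodup_toFinset_eq hEnd (List.Nodup.of_map _ hnd)
    (by ext a; simp [List.mem_toFinset, hmem])

-- ===== VERDICT (by name: the statement is the Claim_ definition above) =====
theorem remove_duplicate_indices_py_spec : Claim_equal_remove_duplicate_indices_py := by
  intro all use hdom hpre
  unfold Spec_remove_duplicate_indices_py
  have hpre' : all.length ≤ use.length := hpre
  revert hpre'
  intro hpre
  have hPP : (PySem.List.enumerate all 0).map (fun p => (p.2, PySem.List.pyGetD use p.1 false))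
      = (PySem.List.enumerate all 0).map (fun p => (p.2, PySem.List.pyGetD use p.1 true)) := by
    refine List.map_congr_left ?_
    intro p hp
    rw [PySem.List.mem_enumerate_iff] at hp
    obtain ⟨k, hk, rfl⟩ := hp
    have hkl : k < use.length := lt_of_lt_of_le hk hpre
    simp only [zero_add]
    rw [PySem.List.pyGetD_natCast, PySem.List.pyGetD_natCast,
      List.getD_eq_getElem _ _ hkl, List.getD_eq_getElem _ _ hkl]
  set P : List (Int × Bool) :=
    (PySem.List.enumerate all 0).map (fun p => (p.2, PySem.List.pyGetD use p.1 false)) with hP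
  have hA : (PySem.List.enumerate all 0).foldl
      (fun (s : PySem.Set Int × List Int × List Bool) p =>
        if PySem.Set.contains s.1 p.2 then s
        else (PySem.Set.add s.1 p.2, s.2.1 ++ [p.2],
              s.2.2 ++ [PySem.List.pyGetD use p.1 false]))
      (PySem.Set.empty, [], [])
      = ((pvKd P []).map Prod.fst, (pvKd P []).map Prod.fst, (pvKd P []).map Prod.snd) := by
    have h1 := pvA_fold P []
    simp only [List.map_nil] at h1
    rw [hP, List.foldl_map] at h1
    exact h1
  have hB := pvB_fold (PySem.List.sorted ((PySem.List.enumerate all 0).map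
      (fun p => (p.2, PySem.List.pyGetD use p.1 true))) Prod.fst) none [] []
  show remove_duplicate_indices_py all use = remove_duplicate_indices_py_alt all use
  simp only [remove_duplicate_indices_py, remove_duplicate_indices_py_alt]
  rw [hA, hB]
  rw [← hPP]
  have hzip : ((pvKd P []).map Prod.fst).zip ((pvKd P []).map Prod.snd) = pvKd P [] := by
    rw [List.zip_map']
    simp
  rw [hzip, pvMain P]
  simp
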